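-- pv_equiv track=rewrite | github.com/MemTensor/HaluMem | scripts/stage2_3_profile2skeleton.py | allocate_steps_to_events
-- ===== SOURCE A (Python) =====
-- from typing import Dict, List
--
-- def allocate_steps_to_events(grouped: Dict[str, List[Dict]], career_event_count: int) -> Dict[int, List[Dict]]:
--     """Allocate steps to events:
--     - Same type allocated to earlier events by step order
--     - Single event can contain at most one step of same type
--     - Balance load as much as possible while satisfying constraints
--     """
--     event_assignments: Dict[int, List[Dict]] = {i: [] for i in range(1, career_event_count + 1)}
--     event_load: Dict[int, int] = {i: 0 for i in range(1, career_event_count + 1)}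
--     event_types: Dict[int, set] = {i: set() for i in range(1, career_event_count + 1)}
--
--     for base_type in sorted(grouped.keys()):
--         steps = grouped[base_type]
--         last_event_idx = 0
--         for step_item in steps:
--             # First attempt: maintain time progression, choose events after last_event_idx that don't contain this base_type and have minimum load
--             candidate_indices = [idx for idx in range(last_event_idx + 1, career_event_count + 1)
--                                  if base_type not in event_types[idx]]
--             if not candidate_indices:
--                 # Second attempt: relax time constraint (scan from beginning), still need to not contain this base_type
--                 candidate_indices = [idx for idx in range(1, career_event_count + 1)
--                                      if base_type not in event_types[idx]]
--             if not candidate_indices: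
--                 # Extreme case (step count of this type greater than event count), cannot satisfy constraints.
--                 # To ensure complete allocation, choose event with minimum load and skip same-type constraint (try to avoid triggering).
--                 candidate_indices = list(range(1, career_event_count + 1))
--             # Choose event with minimum load and minimum index
--             candidate_indices.sort(key=lambda i: (event_load[i], i))
--             chosen = candidate_indices[0]
--
--             event_assignments[chosen].append(step_item)
--             event_load[chosen] += 1
--             event_types[chosen].add(base_type)
--             last_event_idx = chosen
--
--     return event_assignments
-- ===== SOURCE B (Python) =====
-- def _insort(order, entry):
--     lo, hi = 0, len(order)
--     while lo < hi:
--         mid = (lo + hi) // 2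
--         if order[mid] <= entry:
--             lo = mid + 1
--         else:
--             hi = mid
--     order.insert(lo, entry)
--
-- def allocate_steps_to_events(grouped, career_event_count):
--     event_assignments = {i: [] for i in range(1, career_event_count + 1)}
--     event_types = {i: set() for i in range(1, career_event_count + 1)}
--     order = [(0, i) for i in range(1, career_event_count + 1)]
--     for base_type in sorted(grouped.keys()):
--         last = 0
--         for step_item in grouped[base_type]:
--             pick = None
--             fallback = None
--             for entry in order:
--                 if base_type not in event_types[entry[1]]:
--                     if entry[1] > last:
--                         pick = entry
--                         break
--                     if fallback is None:
--                         fallback = entry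
--             if pick is None:
--                 pick = fallback if fallback is not None else order[0]
--             order.remove(pick)
--             _insort(order, (pick[0] + 1, pick[1]))
--             event_assignments[pick[1]].append(step_item)
--             event_types[pick[1]].add(base_type)
--             last = pick[1]
--     return event_assignments
-- ===== Notes on version B (the rewrite author's own statement) =====
-- stated objective: faster
-- what changed: Instead of rebuilding candidate lists and sorting them for every step, B keeps the events in one list permanently sorted by (load, index) (updated per step by remove + binary-search insertion) and picks each step's event by scanning that list for the first eligible entry, with the same three-tier fallback.
import Mathlib
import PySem

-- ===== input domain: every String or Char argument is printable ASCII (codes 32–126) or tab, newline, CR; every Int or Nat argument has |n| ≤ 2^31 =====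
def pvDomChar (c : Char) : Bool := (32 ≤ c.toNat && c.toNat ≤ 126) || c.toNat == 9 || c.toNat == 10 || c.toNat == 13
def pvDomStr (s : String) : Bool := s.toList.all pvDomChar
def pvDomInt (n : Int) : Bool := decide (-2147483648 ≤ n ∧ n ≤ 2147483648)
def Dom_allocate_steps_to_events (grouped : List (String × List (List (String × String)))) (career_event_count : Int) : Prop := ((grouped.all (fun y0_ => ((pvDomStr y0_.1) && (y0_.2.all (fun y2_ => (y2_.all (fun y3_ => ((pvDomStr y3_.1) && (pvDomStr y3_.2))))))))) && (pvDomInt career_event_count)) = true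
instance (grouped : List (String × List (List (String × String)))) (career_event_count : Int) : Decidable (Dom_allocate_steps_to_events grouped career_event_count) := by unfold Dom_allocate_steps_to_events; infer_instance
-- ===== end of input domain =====

-- B replaces A's per-step candidate-list rebuild + sort by one list kept sorted by (load, index)
-- (remove + binary-search reinsertion per step) scanned for the first eligible event; return values
-- are proved equal on Pre_ (A raises IndexError outside it, and so does B).

-- ===== PORT A =====
-- one iteration of A's inner 'for step_item in steps' loop; state = (event_assignments, event_load, event_types, last_event_idx)
def pvStepA (E : Int) (bt : String)
    (s : PySem.Dict Int (List (List (String × String))) × PySem.Dict Int Int ×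
         PySem.Dict Int (PySem.Set String) × Int)
    (st : List (String × String)) :
    PySem.Dict Int (List (List (String × String))) × PySem.Dict Int Int ×
    PySem.Dict Int (PySem.Set String) × Int :=
  let asg := s.1
  let load := s.2.1
  let types := s.2.2.1
  let last := s.2.2.2
  -- candidate_indices, with the two fallbacks (event_types[idx] is always present: idx ∈ 1..E, so getD is exact)
  let c1 := (PySem.List.pyRange (last + 1) (E + 1) 1).filter
      (fun idx => !(PySem.Set.contains (types.getD idx PySem.Set.empty) bt))
  let cand :=
    if c1 = [] then
      let c2 := (PySem.List.pyRange 1 (E + 1) 1).filter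
          (fun idx => !(PySem.Set.contains (types.getD idx PySem.Set.empty) bt))
      if c2 = [] then PySem.List.pyRange 1 (E + 1) 1 else c2
    else c1
  -- candidate_indices.sort(key=lambda i: (event_load[i], i)); chosen = candidate_indices[0]
  -- ([0] raises IndexError only when cand = [], i.e. outside Pre_; headD 0 is exact inside it)
  let sortedc := PySem.List.sorted2 cand (fun i => load.getD i 0) (fun i => i)
  let chosen := sortedc.headD 0
  (asg.modify chosen [] (fun l => l ++ [st]),
   load.modify chosen 0 (fun v => v + 1),
   types.modify chosen PySem.Set.empty (fun t => PySem.Set.add t bt),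
   chosen)

def allocate_steps_to_events (grouped : List (String × List (List (String × String)))) (career_event_count : Int) : List (Int × List (List (String × String))) :=
  let E := career_event_count
  let d := PySem.Dict.ofList grouped
  let asg0 : PySem.Dict Int (List (List (String × String))) :=
    (PySem.List.pyRange 1 (E + 1) 1).foldl (fun a i => a.insert i []) PySem.Dict.empty
  let load0 : PySem.Dict Int Int :=
    (PySem.List.pyRange 1 (E + 1) 1).foldl (fun a i => a.insert i 0) PySem.Dict.empty
  let types0 : PySem.Dict Int (PySem.Set String) :=
    (PySem.List.pyRange 1 (E + 1) 1).foldl (fun a i => a.insert i PySem.Set.empty) PySem.Dict.empty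
  let final :=
    -- sorted(grouped.keys()): Python compares strings by code points = lexicographic on the char list
    (PySem.List.sorted d.keys (fun k => k.toList) false).foldl
      (fun acc bt =>
        let steps := d.getD bt []   -- grouped[base_type]: bt ∈ keys, so getD is exact
        let r := steps.foldl (pvStepA E bt) (acc.1, acc.2.1, acc.2.2, (0 : Int))
        (r.1, r.2.1, r.2.2.1))
      (asg0, load0, types0)
  final.1.items

-- ===== PORT B =====
-- the 'for entry in order: … break' scan: returns (pick, fallback)
def pvScanB (bt : String) (types : PySem.Dict Int (PySem.Set String)) (last : Int) :
    List (Int × Int) → Option (Int × Int) → Option (Int × Int) × Option (Int × Int)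
  | [], fb => (none, fb)
  | e :: rest, fb =>
    if !(PySem.Set.contains (types.getD e.2 PySem.Set.empty) bt) then
      if last < e.2 then (some e, fb)
      else pvScanB bt types last rest (if fb = none then some e else fb)
    else pvScanB bt types last rest fb

-- python tuple comparison 'order[mid] <= entry' (lexicographic)
def pvLeB (a b : Int × Int) : Bool := a.1 < b.1 || (a.1 == b.1 && a.2 ≤ b.2)

-- the 'while lo < hi' binary search of _insort (order[mid] is in range: mid < hi ≤ len);
-- fuel = hi - lo bounds the iteration count (each pass shrinks hi - lo), making the loop structural
def pvBisectGo (order : List (Int × Int)) (entry : Int × Int) : Nat → Nat → Nat → Nat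
  | 0, lo, _ => lo
  | fuel + 1, lo, hi =>
    if lo < hi then
      let mid := (lo + hi) / 2   -- Nat division: exact for Python's (lo+hi)//2 on nonnegative ints
      if pvLeB (order.getD mid (0, 0)) entry then pvBisectGo order entry fuel (mid + 1) hi
      else pvBisectGo order entry fuel lo mid
    else lo

def pvBisect (order : List (Int × Int)) (entry : Int × Int) (lo hi : Nat) : Nat :=
  pvBisectGo order entry (hi - lo) lo hi

-- _insort(order, entry): order.insert(lo, entry) at the found position
def pvInsortB (order : List (Int × Int)) (entry : Int × Int) : List (Int × Int) :=
  PySem.List.insert order ((pvBisect order entry 0 order.length : Nat) : Int) entry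

-- one iteration of B's inner loop; state = (event_assignments, event_types, order, last)
def pvStepB (_E : Int) (bt : String)
    (s : PySem.Dict Int (List (List (String × String))) ×
         PySem.Dict Int (PySem.Set String) × List (Int × Int) × Int)
    (st : List (String × String)) :
    PySem.Dict Int (List (List (String × String))) ×
    PySem.Dict Int (PySem.Set String) × List (Int × Int) × Int :=
  let asg := s.1
  let types := s.2.1
  let order := s.2.2.1
  let last := s.2.2.2
  let scanned := pvScanB bt types last order none
  -- pick = fallback if fallback is not None else order[0]  (order[0] raises only outside Pre_; headD is exact inside it)
  let pick :=
    match scanned.1 with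
    | some e => e
    | none =>
      match scanned.2 with
      | some e => e
      | none => order.headD (0, 0)
  -- order.remove(pick): pick ∈ order whenever order ≠ [], so getD is exact
  let order1 := (PySem.List.remove? order pick).getD order
  let order2 := pvInsortB order1 (pick.1 + 1, pick.2)
  (asg.modify pick.2 [] (fun l => l ++ [st]),
   types.modify pick.2 PySem.Set.empty (fun t => PySem.Set.add t bt),
   order2, pick.2)

def allocate_steps_to_events_alt (grouped : List (String × List (List (String × String)))) (career_event_count : Int) : List (Int × List (List (String × String))) :=
  let E := career_event_count
  let d := PySem.Dict.ofList grouped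
  let asg0 : PySem.Dict Int (List (List (String × String))) :=
    (PySem.List.pyRange 1 (E + 1) 1).foldl (fun a i => a.insert i []) PySem.Dict.empty
  let types0 : PySem.Dict Int (PySem.Set String) :=
    (PySem.List.pyRange 1 (E + 1) 1).foldl (fun a i => a.insert i PySem.Set.empty) PySem.Dict.empty
  let order0 : List (Int × Int) := (PySem.List.pyRange 1 (E + 1) 1).map (fun i => ((0 : Int), i))
  let final :=
    -- sorted(grouped.keys()), by code-point order as above
    (PySem.List.sorted d.keys (fun k => k.toList) false).foldl
      (fun acc bt =>
        let r := (d.getD bt []).foldl (pvStepB E bt) (acc.1, acc.2.1, acc.2.2, (0 : Int))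
        (r.1, r.2.1, r.2.2.1))
      (asg0, types0, order0)
  final.1.items

-- ===== PRECONDITION & SPEC =====
-- Pre_ excludes exactly the inputs where A raises IndexError: career_event_count < 1 while some
-- step list (of the deduplicated dict) is non-empty — there candidate_indices[0] has no element.
def Pre_allocate_steps_to_events (grouped : List (String × List (List (String × String)))) (career_event_count : Int) : Prop :=
  1 ≤ career_event_count ∨ ∀ v ∈ (PySem.Dict.ofList grouped).values, v = []
instance (grouped : List (String × List (List (String × String)))) (career_event_count : Int) : Decidable (Pre_allocate_steps_to_events grouped career_event_count) := by unfold Pre_allocate_steps_to_events; infer_instance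

def pvWitness_allocate_steps_to_events : (List (String × List (List (String × String)))) × Int :=
  ([("work", [[("title", "engineer")], [("title", "manager")]]), ("study", [[("title", "bsc")]])], 2)

def Spec_allocate_steps_to_events (grouped : List (String × List (List (String × String)))) (career_event_count : Int) (out : List (Int × List (List (String × String)))) : Prop := out = allocate_steps_to_events_alt grouped career_event_count
instance (grouped : List (String × List (List (String × String)))) (career_event_count : Int) (out : List (Int × List (List (String × String)))) : Decidable (Spec_allocate_steps_to_events grouped career_event_count out) := by unfold Spec_allocate_steps_to_events; infer_instance

-- ===== CLAIM (what is proved, stated in full; the proofs are below) =====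
def Claim_equal_allocate_steps_to_events : Prop := ∀ (grouped : List (String × List (List (String × String)))) (career_event_count : Int), Dom_allocate_steps_to_events grouped career_event_count → Pre_allocate_steps_to_events grouped career_event_count → Spec_allocate_steps_to_events grouped career_event_count (allocate_steps_to_events grouped career_event_count)

-- ===== LEMMAS AND PROOFS =====

-- strict lexicographic order on (load, index) entries
def pvLt (a b : Int × Int) : Prop := a.1 < b.1 ∨ (a.1 = b.1 ∧ a.2 < b.2)
-- its reflexive closure (what pvLeB decides)
def pvLe (a b : Int × Int) : Prop := a.1 < b.1 ∨ (a.1 = b.1 ∧ a.2 ≤ b.2)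

theorem pvLeB_iff (a b : Int × Int) : pvLeB a b = true ↔ pvLe a b := by
  simp only [pvLeB, pvLe, Bool.or_eq_true, Bool.and_eq_true, decide_eq_true_eq, beq_iff_eq]

theorem pvLt_of_not_pvLe {a b : Int × Int} (h : ¬ pvLe a b) : pvLt b a := by
  unfold pvLe at h; unfold pvLt
  rcases a with ⟨a1, a2⟩; rcases b with ⟨b1, b2⟩; simp at h ⊢; omega

theorem pvLt_of_pvLe_of_ne {a b : Int × Int} (h : pvLe a b) (hne : a ≠ b) : pvLt a b := by
  unfold pvLe at h; unfold pvLt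
  rcases a with ⟨a1, a2⟩; rcases b with ⟨b1, b2⟩
  simp at h ⊢
  rcases h with h | ⟨h1, h2⟩
  · exact Or.inl h
  · subst h1
    rcases lt_or_eq_of_le h2 with h | h
    · exact Or.inr ⟨rfl, h⟩
    · exact absurd (by simp [h]) hne

theorem pvLt_pvLe_trans {a b c : Int × Int} (h1 : pvLt a b) (h2 : pvLe b c) : pvLe a c := by
  unfold pvLt at h1; unfold pvLe at h2 ⊢
  rcases a with ⟨a1, a2⟩; rcases b with ⟨b1, b2⟩; rcases c with ⟨c1, c2⟩
  simp at h1 h2 ⊢; omega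

theorem pvLt_ne {a b : Int × Int} (h : pvLt a b) : a ≠ b := by
  rcases a with ⟨a1, a2⟩; rcases b with ⟨b1, b2⟩
  unfold pvLt at h; simp at h ⊢; omega

-- the coupling invariant: order is the strictly (load, index)-sorted list of (event_load[i], i), i ∈ 1..E
def pvInv (E : Int) (load : PySem.Dict Int Int) (order : List (Int × Int)) : Prop :=
  order.Pairwise pvLt ∧
  ∀ e : Int × Int, e ∈ order ↔ (1 ≤ e.2 ∧ e.2 ≤ E ∧ e.1 = load.getD e.2 0)

theorem pvInv_nodup {E load order} (h : pvInv E load order) : order.Nodup :=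
  h.1.imp (fun hab => pvLt_ne hab)

-- ---- scan characterization ----

theorem pvScan_fst (bt : String) (types : PySem.Dict Int (PySem.Set String)) (last : Int) :
    ∀ (order : List (Int × Int)) (fb : Option (Int × Int)),
      (pvScanB bt types last order fb).1 =
      (order.filter (fun e => !(PySem.Set.contains (types.getD e.2 PySem.Set.empty) bt) && decide (last < e.2))).head? := by
  intro order
  induction order with
  | nil => intro fb; simp [pvScanB]
  | cons e rest ih =>
    intro fb
    by_cases h1 : bt ∈ types.getD e.2 ([] : List String)
    · simp [pvScanB, h1, ih]
    · by_cases h2 : last < e.2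
      · simp [pvScanB, h1, h2]
      · simp [pvScanB, h1, h2, ih]

theorem pvScan_snd (bt : String) (types : PySem.Dict Int (PySem.Set String)) (last : Int) :
    ∀ (order : List (Int × Int)) (fb : Option (Int × Int)),
      (pvScanB bt types last order fb).1 = none →
      (pvScanB bt types last order fb).2 =
      (if fb.isSome then fb
       else (order.filter (fun e => !(PySem.Set.contains (types.getD e.2 PySem.Set.empty) bt))).head?) := by
  intro order
  induction order with
  | nil => intro fb _; cases fb <;> simp [pvScanB]
  | cons e rest ih =>
    intro fb hnone
    by_cases h1 : bt ∈ types.getD e.2 ([] : List String)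
    · simp only [pvScanB] at hnone ⊢
      simp [h1] at hnone ⊢
      rw [ih fb hnone]
      simp
    · by_cases h2 : last < e.2
      · simp [pvScanB, h1, h2] at hnone
      · cases fb with
        | some x =>
          simp [pvScanB, h1, h2] at hnone ⊢
          rw [ih (some x) hnone]
          simp
        | none =>
          simp [pvScanB, h1, h2] at hnone ⊢
          rw [ih (some e) hnone]
          simp

-- ---- binary search characterization ----

theorem pvBisectGo_spec (order : List (Int × Int)) (entry : Int × Int)
    (hs : order.Pairwise pvLt) :
    ∀ (n lo hi : Nat), hi - lo ≤ n → lo ≤ hi → hi ≤ order.length →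
      (∀ j (hj : j < order.length), j < lo → pvLe order[j] entry) →
      (∀ j (hj : j < order.length), hi ≤ j → ¬ pvLe order[j] entry) →
      lo ≤ pvBisectGo order entry n lo hi ∧ pvBisectGo order entry n lo hi ≤ hi ∧
      (∀ j (hj : j < order.length), j < pvBisectGo order entry n lo hi → pvLe order[j] entry) ∧
      (∀ j (hj : j < order.length), pvBisectGo order entry n lo hi ≤ j → ¬ pvLe order[j] entry) := by
  intro n
  induction n with
  | zero =>
    intro lo hi hn hle _ hbelow habove
    have : lo = hi := by omega
    subst this
    exact ⟨le_refl _, le_refl _, hbelow, habove⟩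
  | succ n ih =>
    intro lo hi hn hle hhi hbelow habove
    simp only [pvBisectGo]
    by_cases h : lo < hi
    · simp only [h, if_pos]
      have hmidlt : (lo + hi) / 2 < hi := by omega
      have hmidge : lo ≤ (lo + hi) / 2 := by omega
      have hmidlen : (lo + hi) / 2 < order.length := by omega
      have hget : order.getD ((lo + hi) / 2) (0, 0) = order[(lo + hi) / 2] :=
        List.getD_eq_getElem order (0, 0) hmidlen
      by_cases hc : pvLeB (order.getD ((lo + hi) / 2) (0, 0)) entry = true
      · simp only [hc, if_pos]
        have hmidle : pvLe order[(lo + hi) / 2] entry := by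
          rw [← pvLeB_iff, ← hget]; exact hc
        refine (ih ((lo + hi) / 2 + 1) hi (by omega) (by omega) hhi ?_ habove).imp
          (fun h' => by omega) (fun h' => h')
        intro j hj hjlt
        rcases Nat.lt_or_ge j ((lo + hi) / 2) with hj2 | hj2
        · have := List.pairwise_iff_getElem.mp hs j ((lo + hi) / 2) hj hmidlen hj2
          exact pvLt_pvLe_trans this hmidle
        · have : j = (lo + hi) / 2 := by omega
          subst this; exact hmidle
      · simp only [hc, if_neg, Bool.not_eq_true]
        have hmidgt : ¬ pvLe order[(lo + hi) / 2] entry := by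
          rw [← pvLeB_iff, ← hget]; simpa using hc
        refine (ih lo ((lo + hi) / 2) (by omega) (by omega) (by omega) hbelow ?_).imp
          (fun h' => h') (fun h' => ⟨by omega, h'.2⟩)
        intro j hj hjge
        rcases Nat.lt_or_ge j hi with hj2 | hj2
        · intro hcontra
          rcases Nat.eq_or_lt_of_le hjge with he | hlt
          · exact hmidgt (he ▸ hcontra)
          · have := List.pairwise_iff_getElem.mp hs ((lo + hi) / 2) j hmidlen hj hlt
            exact hmidgt (pvLt_pvLe_trans this hcontra)
        · exact habove j hj hj2
    · simp only [h, if_neg, not_false_iff]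
      exact ⟨le_refl _, by omega, hbelow, fun j hj hjge => habove j hj (by omega)⟩

theorem pvInsort_spec (order : List (Int × Int)) (entry : Int × Int)
    (hs : order.Pairwise pvLt) :
    ∃ p, p ≤ order.length ∧ pvInsortB order entry = order.take p ++ entry :: order.drop p ∧
      (∀ j (hj : j < order.length), j < p → pvLe order[j] entry) ∧
      (∀ j (hj : j < order.length), p ≤ j → ¬ pvLe order[j] entry) := by
  obtain ⟨h1, h2, h3, h4⟩ := pvBisectGo_spec order entry hs (order.length - 0) 0 order.length
    (by omega) (by omega) (le_refl _)
    (fun j hj hlt => by omega) (fun j hj hge => by omega)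
  refine ⟨pvBisect order entry 0 order.length, h2, ?_, h3, h4⟩
  unfold pvInsortB
  exact PySem.List.insert_natCast order _ entry h2

theorem pvInsort_mem (order : List (Int × Int)) (entry : Int × Int)
    (hs : order.Pairwise pvLt) (x : Int × Int) :
    x ∈ pvInsortB order entry ↔ x = entry ∨ x ∈ order := by
  obtain ⟨p, hp, heq, -, -⟩ := pvInsort_spec order entry hs
  rw [heq]
  constructor
  · intro hx
    rcases List.mem_append.mp hx with h | h
    · exact Or.inr ((List.take_sublist p order).mem h)
    · rcases List.mem_cons.mp h with h | h
      · exact Or.inl h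
      · exact Or.inr ((List.drop_sublist p order).mem h)
  · rintro (rfl | hx)
    · exact List.mem_append.mpr (Or.inr (List.mem_cons_self))
    · rcases List.mem_append.mp ((List.take_append_drop p order).symm ▸ hx) with h | h
      · exact List.mem_append.mpr (Or.inl h)
      · exact List.mem_append.mpr (Or.inr (List.mem_cons_of_mem _ h))

theorem pvInsort_pairwise (order : List (Int × Int)) (entry : Int × Int)
    (hs : order.Pairwise pvLt) (hfresh : entry ∉ order) :
    (pvInsortB order entry).Pairwise pvLt := by
  obtain ⟨p, hp, heq, hbelow, habove⟩ := pvInsort_spec order entry hs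
  rw [heq]
  have htake : ∀ x ∈ order.take p, ∃ j, ∃ hj : j < order.length, j < p ∧ order[j] = x := by
    intro x hx
    obtain ⟨j, hj, hx'⟩ := List.mem_iff_getElem.mp hx
    have hjlen : j < order.length := lt_of_lt_of_le (lt_of_lt_of_le hj (by simp [List.length_take])) (le_refl _)
    have hjp : j < p := lt_of_lt_of_le hj (by simp [List.length_take])
    exact ⟨j, hjlen, hjp, by rw [← hx']; exact (List.getElem_take).symm ▸ rfl⟩
  have hdrop : ∀ x ∈ order.drop p, ∃ j, ∃ hj : j < order.length, p ≤ j ∧ order[j] = x := by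
    intro x hx
    obtain ⟨j, hj, hx'⟩ := List.mem_iff_getElem.mp hx
    have hjlen : p + j < order.length := by simp [List.length_drop] at hj; omega
    refine ⟨p + j, hjlen, by omega, ?_⟩
    rw [← hx', List.getElem_drop]
  rw [List.pairwise_append]
  refine ⟨List.Pairwise.sublist (List.take_sublist p order) hs, ?_, ?_⟩
  · rw [List.pairwise_cons]
    refine ⟨?_, List.Pairwise.sublist (List.drop_sublist p order) hs⟩
    intro b hb
    obtain ⟨j, hj, hjp, rfl⟩ := hdrop b hb
    exact pvLt_of_not_pvLe (habove j hj hjp)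
  · intro a ha b hb
    obtain ⟨j, hj, hjp, rfl⟩ := htake a ha
    rcases List.mem_cons.mp hb with rfl | hb'
    · exact pvLt_of_pvLe_of_ne (hbelow j hj hjp)
        (fun hcontra => hfresh (hcontra ▸ List.getElem_mem hj))
    · obtain ⟨k, hk, hkp, rfl⟩ := hdrop b hb'
      exact List.pairwise_iff_getElem.mp hs j k hj hk (by omega)

-- ---- the sorted2 call of port A named as a key into the lexicographic order ----

theorem pvSorted2_eq_sorted_lex (xs : List Int) (k1 : Int → Int) :
    PySem.List.sorted2 xs k1 (fun i => i) false =
    PySem.List.sorted xs (fun i => toLex (k1 i, i)) false := by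
  rw [PySem.List.sorted_eq_foldl_insertBy]
  have hb : (fun (a b : Int) => decide (k1 a < k1 b) || (!decide (k1 b < k1 a) && decide (a < b)))
      = (fun (a b : Int) => decide (toLex (k1 a, a) < toLex (k1 b, b))) := by
    funext a b
    rw [Bool.eq_iff_iff]
    simp only [Bool.or_eq_true, Bool.and_eq_true, Bool.not_eq_true', decide_eq_true_eq,
      decide_eq_false_iff_not, Prod.Lex.lt_iff, ofLex_toLex]
    constructor
    · rintro (h | ⟨h1, h2⟩)
      · exact Or.inl h
      · rcases lt_or_eq_of_le (not_lt.mp h1) with h | h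
        · exact Or.inl h
        · exact Or.inr ⟨h, h2⟩
    · rintro (h | ⟨h1, h2⟩)
      · exact Or.inl h
      · exact Or.inr ⟨not_lt.mpr (le_of_eq h1), h2⟩
  show xs.foldl (fun acc x => PySem.List.insertBy
      (fun a b => decide (k1 a < k1 b) || (!decide (k1 b < k1 a) && decide (a < b))) x acc) [] = _
  rw [hb]

-- ---- bridging: port A's sorted candidate list, read off the maintained order list ----

theorem pvSortedc_eq (E : Int) (load : PySem.Dict Int Int) (order : List (Int × Int))
    (hinv : pvInv E load order) (lo : Int) (hlo : 1 ≤ lo) (q : Int → Bool)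
    (p : Int × Int → Bool) (hp : ∀ e ∈ order, p e = (q e.2 && decide (lo ≤ e.2))) :
    PySem.List.sorted2 ((PySem.List.pyRange lo (E + 1) 1).filter q) (fun i => load.getD i 0) (fun i => i) false
      = (order.filter p).map (fun e => e.2) := by
  rw [List.filter_congr hp, pvSorted2_eq_sorted_lex]
  apply PySem.List.sorted_eq_of_perm_of_pairwise_lt
  · have hnd1 : ((order.filter (fun e => q e.2 && decide (lo ≤ e.2))).map (fun e => e.2)).Nodup := by
      refine List.Nodup.map_on ?_ (List.Nodup.filter _ (pvInv_nodup hinv))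
      intro x hx y hy hxy
      have hx' := (hinv.2 x).mp (List.mem_of_mem_filter hx)
      have hy' := (hinv.2 y).mp (List.mem_of_mem_filter hy)
      exact Prod.ext_iff.mpr ⟨by rw [hx'.2.2, hy'.2.2, hxy], hxy⟩
    have hnd2 : ((PySem.List.pyRange lo (E + 1) 1).filter q).Nodup :=
      List.Nodup.filter _ (PySem.List.nodup_pyRange_one lo (E + 1))
    rw [List.perm_ext_iff_of_nodup hnd1 hnd2]
    intro i
    constructor
    · intro hi
      obtain ⟨e, he, rfl⟩ := List.mem_map.mp hi
      have hef := List.mem_filter.mp he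
      have hq := hef.2
      rw [Bool.and_eq_true, decide_eq_true_eq] at hq
      have he' := (hinv.2 e).mp hef.1
      refine List.mem_filter.mpr ⟨?_, hq.1⟩
      rw [PySem.List.mem_pyRange_one]
      exact ⟨hq.2, by omega⟩
    · intro hi
      have hif := List.mem_filter.mp hi
      rw [PySem.List.mem_pyRange_one] at hif
      refine List.mem_map.mpr ⟨(load.getD i 0, i), List.mem_filter.mpr ⟨?_, ?_⟩, rfl⟩
      · exact (hinv.2 _).mpr ⟨by omega, by omega, rfl⟩
      · rw [Bool.and_eq_true, decide_eq_true_eq]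
        exact ⟨hif.2, hif.1.1⟩
  · rw [List.pairwise_map]
    refine List.Pairwise.imp_of_mem ?_ (List.Pairwise.filter _ hinv.1)
    intro a b ha hb hab
    have ha' := (hinv.2 a).mp (List.mem_of_mem_filter ha)
    have hb' := (hinv.2 b).mp (List.mem_of_mem_filter hb)
    rw [Prod.Lex.lt_iff]
    simp only [ofLex_toLex]
    rcases hab with h | ⟨h1, h2⟩
    · exact Or.inl (by rw [← ha'.2.2, ← hb'.2.2]; exact h)
    · exact Or.inr ⟨by rw [← ha'.2.2, ← hb'.2.2]; exact h1, h2⟩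

-- ---- naming the two per-step selections ----

def pvCandA (E : Int) (types : PySem.Dict Int (PySem.Set String)) (bt : String) (last : Int) : List Int :=
  if ((PySem.List.pyRange (last + 1) (E + 1) 1).filter
        (fun idx => !(PySem.Set.contains (types.getD idx PySem.Set.empty) bt))) = [] then
    if ((PySem.List.pyRange 1 (E + 1) 1).filter
        (fun idx => !(PySem.Set.contains (types.getD idx PySem.Set.empty) bt))) = [] then
      PySem.List.pyRange 1 (E + 1) 1
    else (PySem.List.pyRange 1 (E + 1) 1).filter
        (fun idx => !(PySem.Set.contains (types.getD idx PySem.Set.empty) bt))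
  else (PySem.List.pyRange (last + 1) (E + 1) 1).filter
        (fun idx => !(PySem.Set.contains (types.getD idx PySem.Set.empty) bt))

def pvChosenA (E : Int) (load : PySem.Dict Int Int) (types : PySem.Dict Int (PySem.Set String))
    (bt : String) (last : Int) : Int :=
  (PySem.List.sorted2 (pvCandA E types bt last) (fun i => load.getD i 0) (fun i => i)).headD 0

theorem pvStepA_unfold (E : Int) (bt : String)
    (asg : PySem.Dict Int (List (List (String × String)))) (load : PySem.Dict Int Int)
    (types : PySem.Dict Int (PySem.Set String)) (last : Int) (st : List (String × String)) :
    pvStepA E bt (asg, load, types, last) st =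
      (asg.modify (pvChosenA E load types bt last) [] (fun l => l ++ [st]),
       load.modify (pvChosenA E load types bt last) 0 (fun v => v + 1),
       types.modify (pvChosenA E load types bt last) PySem.Set.empty (fun t => PySem.Set.add t bt),
       pvChosenA E load types bt last) := rfl

def pvPickB (types : PySem.Dict Int (PySem.Set String)) (bt : String) (last : Int)
    (order : List (Int × Int)) : Int × Int :=
  match (pvScanB bt types last order none).1 with
  | some e => e
  | none =>
    match (pvScanB bt types last order none).2 with
    | some e => e
    | none => order.headD (0, 0)

theorem pvStepB_unfold (E : Int) (bt : String)
    (asg : PySem.Dict Int (List (List (String × String))))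
    (types : PySem.Dict Int (PySem.Set String)) (order : List (Int × Int)) (last : Int)
    (st : List (String × String)) :
    pvStepB E bt (asg, types, order, last) st =
      (asg.modify (pvPickB types bt last order).2 [] (fun l => l ++ [st]),
       types.modify (pvPickB types bt last order).2 PySem.Set.empty (fun t => PySem.Set.add t bt),
       pvInsortB ((PySem.List.remove? order (pvPickB types bt last order)).getD order)
         ((pvPickB types bt last order).1 + 1, (pvPickB types bt last order).2),
       (pvPickB types bt last order).2) := rfl

theorem pvPick_eq (E : Int) (bt : String) (types : PySem.Dict Int (PySem.Set String))
    (load : PySem.Dict Int Int) (order : List (Int × Int)) (last : Int)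
    (hE : 1 ≤ E) (hlast : 0 ≤ last) (hinv : pvInv E load order) :
    pvPickB types bt last order ∈ order ∧
    pvChosenA E load types bt last = (pvPickB types bt last order).2 := by
  have hne : order ≠ [] := by
    intro h0
    have h1 := (hinv.2 (load.getD 1 0, 1)).mpr ⟨le_refl 1, hE, rfl⟩
    rw [h0] at h1
    exact absurd h1 (List.not_mem_nil)
  have hb1 := pvSortedc_eq E load order hinv (last + 1) (by omega)
      (fun idx => !(PySem.Set.contains (types.getD idx PySem.Set.empty) bt))
      (fun e => !(PySem.Set.contains (types.getD e.2 PySem.Set.empty) bt) && decide (last < e.2))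
      (by intro e _
          have h : decide (last < e.2) = decide (last + 1 ≤ e.2) := decide_eq_decide.mpr (by omega)
          show (!(PySem.Set.contains (types.getD e.2 PySem.Set.empty) bt) && decide (last < e.2))
            = (!(PySem.Set.contains (types.getD e.2 PySem.Set.empty) bt) && decide (last + 1 ≤ e.2))
          rw [h])
  have hb2 := pvSortedc_eq E load order hinv 1 (le_refl 1)
      (fun idx => !(PySem.Set.contains (types.getD idx PySem.Set.empty) bt))
      (fun e => !(PySem.Set.contains (types.getD e.2 PySem.Set.empty) bt))
      (by intro e he
          have h1 := ((hinv.2 e).mp he).1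
          rw [decide_eq_true (by omega : (1 : Int) ≤ e.2), Bool.and_true])
  have hb3' := pvSortedc_eq E load order hinv 1 (le_refl 1) (fun _ => true) (fun _ => true)
      (by intro e he
          have h1 := ((hinv.2 e).mp he).1
          rw [decide_eq_true (by omega : (1 : Int) ≤ e.2), Bool.and_true])
  rw [List.filter_true] at hb3'
  have hsf := pvScan_fst bt types last order none
  unfold pvPickB pvChosenA pvCandA
  cases hscan1 : (pvScanB bt types last order none).1 with
  | some e =>
    have hscan1f := hscan1
    rw [hsf] at hscan1f
    cases hF : order.filter (fun e => !(PySem.Set.contains (types.getD e.2 PySem.Set.empty) bt) && decide (last < e.2)) with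
    | nil => rw [hF] at hscan1f; simp at hscan1f
    | cons f tl =>
      rw [hF] at hscan1f
      simp only [List.head?_cons, Option.some.injEq] at hscan1f
      have hc1ne : ((PySem.List.pyRange (last + 1) (E + 1) 1).filter
          (fun idx => !(PySem.Set.contains (types.getD idx PySem.Set.empty) bt))) ≠ [] := by
        intro h0
        have hperm := PySem.List.sorted2_perm ((PySem.List.pyRange (last + 1) (E + 1) 1).filter
          (fun idx => !(PySem.Set.contains (types.getD idx PySem.Set.empty) bt)))
          (fun i => load.getD i 0) (fun i => i) false
        rw [hb1, hF, h0] at hperm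
        simp at hperm
      rw [if_neg hc1ne, hb1, hF]
      constructor
      · refine List.mem_of_mem_filter (p := fun e => !(PySem.Set.contains (types.getD e.2 PySem.Set.empty) bt) && decide (last < e.2)) ?_
        rw [hF, hscan1f]
        exact List.mem_cons_self
      · rw [hscan1f]
        rfl
  | none =>
    have hscan1f := hscan1
    rw [hsf] at hscan1f
    have hF1 : order.filter (fun e => !(PySem.Set.contains (types.getD e.2 PySem.Set.empty) bt) && decide (last < e.2)) = [] :=
      List.head?_eq_none_iff.mp hscan1f
    have hc1 : ((PySem.List.pyRange (last + 1) (E + 1) 1).filter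
        (fun idx => !(PySem.Set.contains (types.getD idx PySem.Set.empty) bt))) = [] := by
      have hperm := PySem.List.sorted2_perm ((PySem.List.pyRange (last + 1) (E + 1) 1).filter
        (fun idx => !(PySem.Set.contains (types.getD idx PySem.Set.empty) bt)))
        (fun i => load.getD i 0) (fun i => i) false
      rw [hb1, hF1] at hperm
      exact List.perm_nil.mp hperm.symm
    rw [if_pos hc1]
    have hss := pvScan_snd bt types last order none hscan1
    simp only [Option.isSome_none, Bool.false_eq_true, if_false] at hss
    cases hscan2 : (pvScanB bt types last order none).2 with
    | some f =>
      have hscan2f := hscan2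
      rw [hss] at hscan2f
      cases hF : order.filter (fun e => !(PySem.Set.contains (types.getD e.2 PySem.Set.empty) bt)) with
      | nil => rw [hF] at hscan2f; simp at hscan2f
      | cons g tl =>
        rw [hF] at hscan2f
        simp only [List.head?_cons, Option.some.injEq] at hscan2f
        have hc2ne : ((PySem.List.pyRange 1 (E + 1) 1).filter
            (fun idx => !(PySem.Set.contains (types.getD idx PySem.Set.empty) bt))) ≠ [] := by
          intro h0
          have hperm := PySem.List.sorted2_perm ((PySem.List.pyRange 1 (E + 1) 1).filter
            (fun idx => !(PySem.Set.contains (types.getD idx PySem.Set.empty) bt)))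
            (fun i => load.getD i 0) (fun i => i) false
          rw [hb2, hF, h0] at hperm
          simp at hperm
        rw [if_neg hc2ne, hb2, hF]
        constructor
        · refine List.mem_of_mem_filter (p := fun e => !(PySem.Set.contains (types.getD e.2 PySem.Set.empty) bt)) ?_
          rw [hF, hscan2f]
          exact List.mem_cons_self
        · rw [hscan2f]
          rfl
    | none =>
      have hscan2f := hscan2
      rw [hss] at hscan2f
      have hF2 : order.filter (fun e => !(PySem.Set.contains (types.getD e.2 PySem.Set.empty) bt)) = [] :=
        List.head?_eq_none_iff.mp hscan2f
      have hc2 : ((PySem.List.pyRange 1 (E + 1) 1).filter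
          (fun idx => !(PySem.Set.contains (types.getD idx PySem.Set.empty) bt))) = [] := by
        have hperm := PySem.List.sorted2_perm ((PySem.List.pyRange 1 (E + 1) 1).filter
          (fun idx => !(PySem.Set.contains (types.getD idx PySem.Set.empty) bt)))
          (fun i => load.getD i 0) (fun i => i) false
        rw [hb2, hF2] at hperm
        exact List.perm_nil.mp hperm.symm
      rw [if_pos hc2, hb3']
      cases order with
      | nil => exact absurd rfl hne
      | cons o rest => exact ⟨List.mem_cons_self, rfl⟩

-- ---- one full step: B's state transition written through A's ----

theorem pvStep_full (E : Int) (bt : String) (st : List (String × String))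
    (asg : PySem.Dict Int (List (List (String × String))))
    (load : PySem.Dict Int Int) (types : PySem.Dict Int (PySem.Set String))
    (order : List (Int × Int)) (last : Int)
    (hE : 1 ≤ E) (hlast : 0 ≤ last) (hinv : pvInv E load order) :
    pvStepB E bt (asg, types, order, last) st
      = ((pvStepA E bt (asg, load, types, last) st).1,
         (pvStepA E bt (asg, load, types, last) st).2.2.1,
         pvInsortB (order.erase (pvPickB types bt last order))
           ((pvPickB types bt last order).1 + 1, (pvPickB types bt last order).2),
         (pvStepA E bt (asg, load, types, last) st).2.2.2)
    ∧ pvInv E (pvStepA E bt (asg, load, types, last) st).2.1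
        (pvInsortB (order.erase (pvPickB types bt last order))
           ((pvPickB types bt last order).1 + 1, (pvPickB types bt last order).2))
    ∧ 0 ≤ (pvStepA E bt (asg, load, types, last) st).2.2.2 := by
  obtain ⟨hmem, hch⟩ := pvPick_eq E bt types load order last hE hlast hinv
  have hshape := (hinv.2 (pvPickB types bt last order)).mp hmem
  have hremove : (PySem.List.remove? order (pvPickB types bt last order)).getD order
      = order.erase (pvPickB types bt last order) := by
    rw [PySem.List.remove?_eq_some_erase order (pvPickB types bt last order) hmem]
    rfl
  have hepw : (order.erase (pvPickB types bt last order)).Pairwise pvLt :=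
    List.Pairwise.sublist List.erase_sublist hinv.1
  have hfresh : ((pvPickB types bt last order).1 + 1, (pvPickB types bt last order).2)
      ∉ order.erase (pvPickB types bt last order) := by
    intro hmem2
    have h2 := (hinv.2 _).mp (List.mem_of_mem_erase hmem2)
    have h3 := h2.2.2
    have h4 := hshape.2.2
    simp only at h3 h4
    omega
  refine ⟨?_, ?_, ?_⟩
  · rw [pvStepA_unfold, pvStepB_unfold, hremove, hch]
  · have hA : (pvStepA E bt (asg, load, types, last) st).2.1
        = load.modify (pvPickB types bt last order).2 0 (fun v => v + 1) := by
      rw [pvStepA_unfold, hch]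
    rw [hA]
    constructor
    · exact pvInsort_pairwise _ _ hepw hfresh
    · intro x
      rw [pvInsort_mem _ _ hepw, (pvInv_nodup hinv).mem_erase_iff, PySem.Dict.getD_modify]
      by_cases hx2 : x.2 = (pvPickB types bt last order).2
      · rw [if_pos hx2]
        constructor
        · rintro (rfl | ⟨hne, hxo⟩)
          · exact ⟨by simpa using hshape.1, by simpa using hshape.2.1,
              by simp only; rw [← hshape.2.2]⟩
          · exfalso
            have hxs := (hinv.2 x).mp hxo
            exact hne (Prod.ext_iff.mpr ⟨by rw [hxs.2.2, hx2, ← hshape.2.2], hx2⟩)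
        · rintro ⟨hq1, hq2, hq3⟩
          left
          exact Prod.ext_iff.mpr ⟨by rw [hq3, ← hshape.2.2], hx2⟩
      · rw [if_neg hx2]
        constructor
        · rintro (rfl | ⟨hne, hxo⟩)
          · exact absurd rfl hx2
          · exact (hinv.2 x).mp hxo
        · intro hx
          right
          refine ⟨?_, (hinv.2 x).mpr hx⟩
          intro hcontra
          exact hx2 (by rw [hcontra])
  · have hA : (pvStepA E bt (asg, load, types, last) st).2.2.2 = (pvPickB types bt last order).2 := by
      rw [pvStepA_unfold, hch]
    rw [hA]
    have := hshape.1
    omega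

-- ---- the inner loop ('for step_item in steps') ----

theorem pvInner (E : Int) (bt : String) (hE : 1 ≤ E) :
    ∀ (steps : List (List (String × String)))
      (asg : PySem.Dict Int (List (List (String × String))))
      (load : PySem.Dict Int Int) (types : PySem.Dict Int (PySem.Set String))
      (order : List (Int × Int)) (last : Int),
      0 ≤ last → pvInv E load order →
      ∃ order',
        steps.foldl (pvStepB E bt) (asg, types, order, last)
          = ((steps.foldl (pvStepA E bt) (asg, load, types, last)).1,
             (steps.foldl (pvStepA E bt) (asg, load, types, last)).2.2.1,
             order',
             (steps.foldl (pvStepA E bt) (asg, load, types, last)).2.2.2)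
        ∧ pvInv E (steps.foldl (pvStepA E bt) (asg, load, types, last)).2.1 order' := by
  intro steps
  induction steps with
  | nil =>
    intro asg load types order last _ hinv
    exact ⟨order, rfl, hinv⟩
  | cons st rest ih =>
    intro asg load types order last hlast hinv
    obtain ⟨heq, hinv', hlast'⟩ := pvStep_full E bt st asg load types order last hE hlast hinv
    rw [List.foldl_cons, List.foldl_cons, heq]
    exact ih (pvStepA E bt (asg, load, types, last) st).1
      (pvStepA E bt (asg, load, types, last) st).2.1
      (pvStepA E bt (asg, load, types, last) st).2.2.1
      (pvInsortB (order.erase (pvPickB types bt last order))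
        ((pvPickB types bt last order).1 + 1, (pvPickB types bt last order).2))
      (pvStepA E bt (asg, load, types, last) st).2.2.2 hlast' hinv'

-- ---- the outer loop ('for base_type in sorted(grouped.keys())') ----

theorem pvOuter (E : Int) (d : PySem.Dict String (List (List (String × String)))) (hE : 1 ≤ E) :
    ∀ (keys : List String)
      (asg : PySem.Dict Int (List (List (String × String))))
      (load : PySem.Dict Int Int) (types : PySem.Dict Int (PySem.Set String))
      (order : List (Int × Int)), pvInv E load order →
      (keys.foldl (fun acc bt =>
          (((d.getD bt []).foldl (pvStepA E bt) (acc.1, acc.2.1, acc.2.2, (0 : Int))).1,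
           ((d.getD bt []).foldl (pvStepA E bt) (acc.1, acc.2.1, acc.2.2, (0 : Int))).2.1,
           ((d.getD bt []).foldl (pvStepA E bt) (acc.1, acc.2.1, acc.2.2, (0 : Int))).2.2.1))
        (asg, load, types)).1
      = (keys.foldl (fun acc bt =>
          (((d.getD bt []).foldl (pvStepB E bt) (acc.1, acc.2.1, acc.2.2, (0 : Int))).1,
           ((d.getD bt []).foldl (pvStepB E bt) (acc.1, acc.2.1, acc.2.2, (0 : Int))).2.1,
           ((d.getD bt []).foldl (pvStepB E bt) (acc.1, acc.2.1, acc.2.2, (0 : Int))).2.2.1))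
        (asg, types, order)).1 := by
  intro keys
  induction keys with
  | nil => intro asg load types order _; rfl
  | cons k ks ih =>
    intro asg load types order hinv
    rw [List.foldl_cons, List.foldl_cons]
    obtain ⟨order', ho1, ho2⟩ := pvInner E k hE (d.getD k []) asg load types order 0 le_rfl hinv
    dsimp only
    rw [ho1]
    exact ih ((d.getD k []).foldl (pvStepA E k) (asg, load, types, 0)).1
      ((d.getD k []).foldl (pvStepA E k) (asg, load, types, 0)).2.1
      ((d.getD k []).foldl (pvStepA E k) (asg, load, types, 0)).2.2.1 order' ho2

-- ---- initial state ----

theorem pvGetD_foldl_insert_zero (l : List Int) :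
    ∀ (d : PySem.Dict Int Int), (∀ k, d.getD k 0 = 0) →
      ∀ k, (l.foldl (fun a i => a.insert i (0 : Int)) d).getD k 0 = 0 := by
  induction l with
  | nil => intro d h k; exact h k
  | cons i rest ih =>
    intro d h k
    rw [List.foldl_cons]
    refine ih _ (fun k' => ?_) k
    rw [PySem.Dict.getD_insert]
    split_ifs with h1
    · rfl
    · exact h k'

theorem pvLoad0 (E k : Int) :
    ((PySem.List.pyRange 1 (E + 1) 1).foldl (fun a i => a.insert i (0 : Int)) PySem.Dict.empty).getD k 0 = 0 :=
  pvGetD_foldl_insert_zero _ _ (fun k' => PySem.Dict.getD_empty k' 0) k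

theorem pvInv0 (E : Int) :
    pvInv E ((PySem.List.pyRange 1 (E + 1) 1).foldl (fun a i => a.insert i (0 : Int)) PySem.Dict.empty)
      ((PySem.List.pyRange 1 (E + 1) 1).map (fun i => ((0 : Int), i))) := by
  constructor
  · rw [List.pairwise_map]
    exact (PySem.List.pairwise_lt_pyRange_one 1 (E + 1)).imp (fun h => Or.inr ⟨rfl, h⟩)
  · intro e
    rw [List.mem_map]
    constructor
    · rintro ⟨i, hi, rfl⟩
      rw [PySem.List.mem_pyRange_one] at hi
      exact ⟨hi.1, by omega, (pvLoad0 E i).symm⟩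
    · rintro ⟨h1, h2, h3⟩
      refine ⟨e.2, ?_, ?_⟩
      · rw [PySem.List.mem_pyRange_one]
        omega
      · refine Prod.ext_iff.mpr ⟨?_, rfl⟩
        rw [h3, pvLoad0]

-- ---- the whole function ----

theorem pvMain (grouped : List (String × List (List (String × String)))) (E : Int)
    (hpre : Pre_allocate_steps_to_events grouped E) :
    allocate_steps_to_events grouped E = allocate_steps_to_events_alt grouped E := by
  by_cases hE : 1 ≤ E
  · exact congrArg PySem.Dict.items
      (pvOuter E (PySem.Dict.ofList grouped) hE
        (PySem.List.sorted (PySem.Dict.ofList grouped).keys (fun k => k.toList) false)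
        ((PySem.List.pyRange 1 (E + 1) 1).foldl (fun a i => a.insert i []) PySem.Dict.empty)
        ((PySem.List.pyRange 1 (E + 1) 1).foldl (fun a i => a.insert i (0 : Int)) PySem.Dict.empty)
        ((PySem.List.pyRange 1 (E + 1) 1).foldl (fun a i => a.insert i PySem.Set.empty) PySem.Dict.empty)
        ((PySem.List.pyRange 1 (E + 1) 1).map (fun i => ((0 : Int), i)))
        (pvInv0 E))
  · rcases hpre with hE' | hall
    · omega
    have hempty : ∀ bt ∈ PySem.List.sorted (PySem.Dict.ofList grouped).keys (fun k => k.toList) false,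
        (PySem.Dict.ofList grouped).getD bt [] = [] := by
      intro bt hbt
      rw [PySem.List.mem_sorted] at hbt
      cases hv : (PySem.Dict.ofList grouped).get? bt with
      | none => exact absurd hbt ((PySem.Dict.get?_eq_none_iff_not_mem_keys _ bt).mp hv)
      | some v =>
        have hit := PySem.Dict.mem_items_of_get?_eq_some _ hv
        have hvv : v ∈ (PySem.Dict.ofList grouped).values := by
          simp only [PySem.Dict.values]
          exact List.mem_map.mpr ⟨(bt, v), hit, rfl⟩
        rw [PySem.Dict.getD_eq_get?_getD, hv]
        exact hall v hvv
    show ((PySem.List.sorted (PySem.Dict.ofList grouped).keys (fun k => k.toList) false).foldl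
        (fun acc bt =>
          ((((PySem.Dict.ofList grouped).getD bt []).foldl (pvStepA E bt) (acc.1, acc.2.1, acc.2.2, (0 : Int))).1,
           (((PySem.Dict.ofList grouped).getD bt []).foldl (pvStepA E bt) (acc.1, acc.2.1, acc.2.2, (0 : Int))).2.1,
           (((PySem.Dict.ofList grouped).getD bt []).foldl (pvStepA E bt) (acc.1, acc.2.1, acc.2.2, (0 : Int))).2.2.1))
        (((PySem.List.pyRange 1 (E + 1) 1).foldl (fun a i => a.insert i []) PySem.Dict.empty),
         ((PySem.List.pyRange 1 (E + 1) 1).foldl (fun a i => a.insert i (0 : Int)) PySem.Dict.empty),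
         ((PySem.List.pyRange 1 (E + 1) 1).foldl (fun a i => a.insert i PySem.Set.empty) PySem.Dict.empty))).1.items
      = ((PySem.List.sorted (PySem.Dict.ofList grouped).keys (fun k => k.toList) false).foldl
        (fun acc bt =>
          ((((PySem.Dict.ofList grouped).getD bt []).foldl (pvStepB E bt) (acc.1, acc.2.1, acc.2.2, (0 : Int))).1,
           (((PySem.Dict.ofList grouped).getD bt []).foldl (pvStepB E bt) (acc.1, acc.2.1, acc.2.2, (0 : Int))).2.1,
           (((PySem.Dict.ofList grouped).getD bt []).foldl (pvStepB E bt) (acc.1, acc.2.1, acc.2.2, (0 : Int))).2.2.1))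
        (((PySem.List.pyRange 1 (E + 1) 1).foldl (fun a i => a.insert i []) PySem.Dict.empty),
         ((PySem.List.pyRange 1 (E + 1) 1).foldl (fun a i => a.insert i PySem.Set.empty) PySem.Dict.empty),
         ((PySem.List.pyRange 1 (E + 1) 1).map (fun i => ((0 : Int), i))))).1.items
    have h1 : (PySem.List.sorted (PySem.Dict.ofList grouped).keys (fun k => k.toList) false).foldl
        (fun acc bt =>
          ((((PySem.Dict.ofList grouped).getD bt []).foldl (pvStepA E bt) (acc.1, acc.2.1, acc.2.2, (0 : Int))).1,
           (((PySem.Dict.ofList grouped).getD bt []).foldl (pvStepA E bt) (acc.1, acc.2.1, acc.2.2, (0 : Int))).2.1,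
           (((PySem.Dict.ofList grouped).getD bt []).foldl (pvStepA E bt) (acc.1, acc.2.1, acc.2.2, (0 : Int))).2.2.1))
        (((PySem.List.pyRange 1 (E + 1) 1).foldl (fun a i => a.insert i []) PySem.Dict.empty),
         ((PySem.List.pyRange 1 (E + 1) 1).foldl (fun a i => a.insert i (0 : Int)) PySem.Dict.empty),
         ((PySem.List.pyRange 1 (E + 1) 1).foldl (fun a i => a.insert i PySem.Set.empty) PySem.Dict.empty))
      = (((PySem.List.pyRange 1 (E + 1) 1).foldl (fun a i => a.insert i []) PySem.Dict.empty),
         ((PySem.List.pyRange 1 (E + 1) 1).foldl (fun a i => a.insert i (0 : Int)) PySem.Dict.empty),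
         ((PySem.List.pyRange 1 (E + 1) 1).foldl (fun a i => a.insert i PySem.Set.empty) PySem.Dict.empty)) := by
      refine Eq.trans (PySem.List.foldl_congr_mem _ _ (fun acc _ => acc) _ ?_) (PySem.List.foldl_ignore _ _)
      intro acc bt hbt
      rw [hempty bt hbt]
      rfl
    have h2 : (PySem.List.sorted (PySem.Dict.ofList grouped).keys (fun k => k.toList) false).foldl
        (fun acc bt =>
          ((((PySem.Dict.ofList grouped).getD bt []).foldl (pvStepB E bt) (acc.1, acc.2.1, acc.2.2, (0 : Int))).1,
           (((PySem.Dict.ofList grouped).getD bt []).foldl (pvStepB E bt) (acc.1, acc.2.1, acc.2.2, (0 : Int))).2.1,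
           (((PySem.Dict.ofList grouped).getD bt []).foldl (pvStepB E bt) (acc.1, acc.2.1, acc.2.2, (0 : Int))).2.2.1))
        (((PySem.List.pyRange 1 (E + 1) 1).foldl (fun a i => a.insert i []) PySem.Dict.empty),
         ((PySem.List.pyRange 1 (E + 1) 1).foldl (fun a i => a.insert i PySem.Set.empty) PySem.Dict.empty),
         ((PySem.List.pyRange 1 (E + 1) 1).map (fun i => ((0 : Int), i))))
      = (((PySem.List.pyRange 1 (E + 1) 1).foldl (fun a i => a.insert i []) PySem.Dict.empty),
         ((PySem.List.pyRange 1 (E + 1) 1).foldl (fun a i => a.insert i PySem.Set.empty) PySem.Dict.empty),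
         ((PySem.List.pyRange 1 (E + 1) 1).map (fun i => ((0 : Int), i)))) := by
      refine Eq.trans (PySem.List.foldl_congr_mem _ _ (fun acc _ => acc) _ ?_) (PySem.List.foldl_ignore _ _)
      intro acc bt hbt
      rw [hempty bt hbt]
      rfl
    rw [h1, h2]

-- ===== VERDICT (by name: the statement is the Claim_ definition above) =====
theorem allocate_steps_to_events_spec : Claim_equal_allocate_steps_to_events := by
  intro grouped career_event_count _hdom hpre
  unfold Spec_allocate_steps_to_events
  exact pvMain grouped career_event_count hpre
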